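-- pv_equiv track=rewrite | github.com/n-n-k/narrowband-astr212 | fitsTest.py | make_triangles
-- ===== SOURCE A (Python) =====
-- def make_triangles (points):
--     """
--     Recursively create a list of triangles from a given set of points
--
--     Parameters:
--         points (list) : the list of Cartesian points
--
--     Returns:
--         triangles (list) : the list of triangle vertices
--     """
--     # Initialize the triangles array
--     triangles = []
--     # Get the first two vertices and the remaining tertiary points
--     first, second, rest = points[0], points[1], points[2:]
--
--     # Iterate through the remaining tertiary points to make triangles
--     for point in rest:
--         triangles.append((first, second, point))
--
--     # Construct the next set of points to iterate through
--     next_points = [second] + rest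
--
--     # If there are more than 2 points, recrusively make more triangles
--     # otherwise, cease recursion and return the current list
--     if len(next_points) > 2:
--         return triangles + make_triangles(next_points)
--     else:
--         return triangles
-- ===== SOURCE B (Python) =====
-- def make_triangles(points):
--     """Flat double loop instead of recursion: triangle (points[i], points[i+1], points[k]) for each k >= i+2."""
--     n = len(points)
--     triangles = []
--     for i in range(n - 1):
--         for k in range(i + 2, n):
--             triangles.append((points[i], points[i + 1], points[k]))
--     return triangles
-- ===== Notes on version B (the rewrite author's own statement) =====
-- stated objective: simpler
-- what changed: Replaced the recursion over the list tail with list concatenation by a single flat index-based double loop appending each triple directly.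
import Mathlib
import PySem

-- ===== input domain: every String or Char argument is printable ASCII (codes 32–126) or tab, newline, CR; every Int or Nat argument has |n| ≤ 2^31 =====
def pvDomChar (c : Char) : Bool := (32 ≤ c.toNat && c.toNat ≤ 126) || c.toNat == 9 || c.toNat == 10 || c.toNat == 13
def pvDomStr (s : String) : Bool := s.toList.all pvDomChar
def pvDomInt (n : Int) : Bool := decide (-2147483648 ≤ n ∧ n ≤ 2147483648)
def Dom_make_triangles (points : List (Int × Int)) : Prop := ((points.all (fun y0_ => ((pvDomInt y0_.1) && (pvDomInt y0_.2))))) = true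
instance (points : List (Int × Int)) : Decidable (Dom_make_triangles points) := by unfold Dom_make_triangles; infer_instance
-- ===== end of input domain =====

-- B replaces A's tail recursion + concatenation by one flat index-based double loop (objective: simpler).
-- ===== PORT A =====
def make_triangles (points : List (Int × Int)) : List ((Int × Int) × (Int × Int) × (Int × Int)) :=
  match points with
  | first :: second :: rest =>
      -- triangles = []; for point in rest: triangles.append((first, second, point))
      let triangles := rest.foldl (fun acc point => acc ++ [(first, second, point)]) []
      -- next_points = [second] + rest
      let next_points := second :: rest
      if next_points.length > 2 then triangles ++ make_triangles next_points else triangles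
  | _ => []   -- unreachable under Pre_ (Python raises IndexError here)

-- ===== PORT B =====
def make_triangles_alt (points : List (Int × Int)) : List ((Int × Int) × (Int × Int) × (Int × Int)) :=
  (PySem.List.pyRange 0 ((points.length : Int) - 1) 1).foldl (fun tri i =>
    (PySem.List.pyRange (i + 2) (points.length : Int) 1).foldl (fun tri2 k =>
      tri2 ++ [(PySem.List.pyGetD points i (0, 0), PySem.List.pyGetD points (i + 1) (0, 0),
                PySem.List.pyGetD points k (0, 0))]) tri) []

-- ===== PRECONDITION & SPEC =====
-- Pre_ excludes lists of fewer than 2 points, on which Python A raises IndexError.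
def Pre_make_triangles (points : List (Int × Int)) : Prop := 2 ≤ points.length
instance (points : List (Int × Int)) : Decidable (Pre_make_triangles points) := by unfold Pre_make_triangles; infer_instance
def pvWitness_make_triangles : (List (Int × Int)) := [(0, 0), (1, 1), (2, 2)]

def Spec_make_triangles (points : List (Int × Int)) (out : List ((Int × Int) × (Int × Int) × (Int × Int))) : Prop := out = make_triangles_alt points
instance (points : List (Int × Int)) (out : List ((Int × Int) × (Int × Int) × (Int × Int))) : Decidable (Spec_make_triangles points out) := by unfold Spec_make_triangles; infer_instance

-- ===== CLAIM (what is proved, stated in full; the proofs are below) =====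
def Claim_equal_make_triangles : Prop := ∀ (points : List (Int × Int)), Dom_make_triangles points → Pre_make_triangles points → Spec_make_triangles points (make_triangles points)

-- ===== LEMMAS AND PROOFS =====

-- closed form of B's port: the loops as a flatMap of maps
lemma alt_closed (points : List (Int × Int)) :
    make_triangles_alt points =
    (PySem.List.pyRange 0 ((points.length : Int) - 1) 1).flatMap (fun i =>
      (PySem.List.pyRange (i + 2) (points.length : Int) 1).map (fun k =>
        (PySem.List.pyGetD points i (0, 0), PySem.List.pyGetD points (i + 1) (0, 0),
         PySem.List.pyGetD points k (0, 0)))) := by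
  unfold make_triangles_alt
  simp only [PySem.List.foldl_append_singleton_eq_map, PySem.List.foldl_append_eq_flatMap,
    List.nil_append]

lemma shift_range (a b : Int) :
    PySem.List.pyRange (a + 1) (b + 1) 1 = (PySem.List.pyRange a b 1).map (fun x => x + 1) := by
  rw [PySem.List.pyRange_one, PySem.List.pyRange_one]
  have h : b + 1 - (a + 1) = b - a := by ring
  rw [h, List.map_map]
  apply List.map_congr_left
  intro k _
  simp [Function.comp]
  ring

lemma pyGetD_cons_succ (x : Int × Int) (xs : List (Int × Int)) (j : Int) (hj : 0 ≤ j) (d : Int × Int) :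
    PySem.List.pyGetD (x :: xs) (j + 1) d = PySem.List.pyGetD xs j d := by
  have h1 : j = (j.toNat : Int) := by omega
  have h2 : j + 1 = ((j.toNat + 1 : Nat) : Int) := by omega
  rw [h2, h1, PySem.List.pyGetD_natCast, PySem.List.pyGetD_natCast]
  simp [max_eq_left hj]

lemma flatMap_congr_mem' {A B : Type} (l : List A) (f g : A → List B)
    (h : ∀ x ∈ l, f x = g x) : l.flatMap f = l.flatMap g := by
  induction l with
  | nil => rfl
  | cons a t ih =>
    simp only [List.flatMap_cons]
    rw [h a (by simp), ih (fun x hx => h x (by simp [hx]))]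

lemma alt_short (points : List (Int × Int)) (h : points.length ≤ 2) :
    make_triangles_alt points = [] := by
  rw [alt_closed]
  apply List.flatMap_eq_nil_iff.mpr
  intro i hi
  rw [PySem.List.mem_pyRange_one] at hi
  rw [PySem.List.pyRange_one_eq_nil (by omega)]
  simp

lemma alt_cons (p0 p1 : Int × Int) (rest : List (Int × Int)) :
    make_triangles_alt (p0 :: p1 :: rest) =
      rest.map (fun p => (p0, p1, p)) ++ make_triangles_alt (p1 :: rest) := by
  rw [alt_closed, alt_closed]
  have hn : ((p0 :: p1 :: rest).length : Int) = (rest.length : Int) + 2 := by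
    simp; omega
  have hn' : ((p1 :: rest).length : Int) = (rest.length : Int) + 1 := by simp
  rw [hn, hn']
  have e1 : (rest.length : Int) + 2 - 1 = (rest.length : Int) + 1 := by ring
  have e2 : (rest.length : Int) + 1 - 1 = (rest.length : Int) := by ring
  rw [e1, e2]
  rw [PySem.List.pyRange_one_cons (show (0:Int) < (rest.length : Int) + 1 by omega),
    List.flatMap_cons]
  simp only [zero_add]
  congr 1
  · -- first chunk: i = 0 gives rest.map (p0, p1, ·)
    have hdrop : (PySem.List.pyRange 2 ((rest.length : Int) + 2) 1).map
        (fun k => PySem.List.pyGetD (p0 :: p1 :: rest) k (0, 0))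
        = (p0 :: p1 :: rest).drop 2 := by
      have := PySem.List.map_pyGetD_pyRange (xs := p0 :: p1 :: rest) (a := 2)
        (d := ((0 : Int), (0 : Int))) (by omega)
      simpa [PySem.List.len_eq, hn] using this
    have : (PySem.List.pyRange 2 ((rest.length : Int) + 2) 1).map
          (fun k => (PySem.List.pyGetD (p0 :: p1 :: rest) 0 (0, 0),
            PySem.List.pyGetD (p0 :: p1 :: rest) 1 (0, 0),
            PySem.List.pyGetD (p0 :: p1 :: rest) k (0, 0)))
        = ((PySem.List.pyRange 2 ((rest.length : Int) + 2) 1).map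
            (fun k => PySem.List.pyGetD (p0 :: p1 :: rest) k (0, 0))).map
            (fun p => (p0, p1, p)) := by
      rw [List.map_map]
      apply List.map_congr_left
      intro k _
      have h01 : PySem.List.pyGetD (p0 :: p1 :: rest) 1 (0, 0) = p1 := by
        have := pyGetD_cons_succ p0 (p1 :: rest) 0 le_rfl (0, 0)
        simpa [PySem.List.pyGetD_zero_cons] using this
      simp [Function.comp, PySem.List.pyGetD_zero_cons, h01]
    rw [this, hdrop]
    simp
  · -- remaining chunks: index shift from (p0 :: p1 :: rest) to (p1 :: rest)
    have hsh : PySem.List.pyRange 1 ((rest.length : Int) + 1) 1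
        = (PySem.List.pyRange 0 (rest.length : Int) 1).map (fun x => x + 1) := by
      have := shift_range 0 (rest.length : Int)
      simpa using this
    rw [hsh, List.flatMap_map]
    apply flatMap_congr_mem'
    intro i hi
    rw [PySem.List.mem_pyRange_one] at hi
    have hsh2 : PySem.List.pyRange (i + 1 + 2) ((rest.length : Int) + 2) 1
        = (PySem.List.pyRange (i + 2) ((rest.length : Int) + 1) 1).map (fun x => x + 1) := by
      have := shift_range (i + 2) ((rest.length : Int) + 1)
      have e : i + 2 + 1 = i + 1 + 2 := by ring
      rw [e] at this
      simpa using this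
    rw [hsh2, List.map_map]
    apply List.map_congr_left
    intro k hk
    rw [PySem.List.mem_pyRange_one] at hk
    simp only [Function.comp]
    have e3 : i + 1 + 1 = (i + 1) + 1 := rfl
    rw [pyGetD_cons_succ _ _ i hi.1, pyGetD_cons_succ _ _ (i + 1) (by omega),
      pyGetD_cons_succ _ _ k (by omega)]

lemma main_eq (points : List (Int × Int)) : make_triangles points = make_triangles_alt points := by
  induction points with
  | nil => rw [alt_short _ (by simp)]; simp [make_triangles]
  | cons p0 t ih =>
    match t with
    | [] => rw [alt_short _ (by simp)]; simp [make_triangles]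
    | [p1] =>
      rw [alt_cons, alt_short _ (by simp)]
      simp [make_triangles]
    | [p1, r] =>
      rw [alt_cons, alt_short _ (by simp)]
      simp [make_triangles]
    | p1 :: r1 :: r2 :: rs =>
      rw [alt_cons, ← ih]
      conv_lhs => rw [make_triangles]
      simp only [PySem.List.foldl_append_singleton_eq_map, List.nil_append]
      rw [if_pos (show (p1 :: r1 :: r2 :: rs).length > 2 by simp only [List.length_cons]; omega)]

-- ===== VERDICT (by name: the statement is the Claim_ definition above) =====
theorem make_triangles_spec : Claim_equal_make_triangles := by
  intro points _ _
  unfold Spec_make_triangles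
  exact main_eq points
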